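-- pv_equiv track=rewrite | github.com/cfrichardson1/tool_kit | scrape_toolkit.py | sequential_list_separator
-- ===== SOURCE A (Python) =====
-- def sequential_list_separator(list_to_seperate):
--     '''
--     Takes in non sequential 0 to nth list and returns a list of
--     lists based on sequential grouping
--
--         i.e. [[1,3,5], [5,8,3,4], [3,5,7,1,34]]
--                         ==OUTPUT==
--                 [1,3,5,5,8,3,4,3,5,7,1,34]
--     '''
--     seperated_lists = []
--
--     sub_list = []
--     prev_num = min(sorted(list_to_seperate))-1
--
--     for index in list_to_seperate:
--
--         if prev_num+1 != index: # if not sequential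
--
--             # if sublist has items, it is appended and emptied
--             if sub_list:
--                 seperated_lists.append(sub_list)
--                 sub_list = []
--
--         sub_list.append(index)
--
--         prev_num = index
--
--     seperated_lists.append(sub_list)
--
--     return seperated_lists
-- ===== SOURCE B (Python) =====
-- def sequential_list_separator(list_to_seperate):
--     # Build the groups back-to-front: walk the list in reverse, growing the
--     # (reversed) current group by appends, then undo both reversals at the end.
--     groups = []
--     for v in reversed(list_to_seperate):
--         if groups and groups[-1][-1] == v + 1:
--             groups[-1].append(v)
--         else:
--             groups.append([v])
--     return [list(reversed(g)) for g in reversed(groups)]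
-- ===== Notes on version B (the rewrite author's own statement) =====
-- stated objective: alternative
-- what changed: Replaces A's forward scan with a min()-derived prev_num sentinel and flush-on-break mutable sub_list by a reverse traversal that builds the groups back-to-front (appending into reversed groups, then undoing both reversals), with no sort/min and no sentinel.
-- outside the precondition, e.g. on sequential_list_separator([]): A raises ValueError, B returns []
import Mathlib
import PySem

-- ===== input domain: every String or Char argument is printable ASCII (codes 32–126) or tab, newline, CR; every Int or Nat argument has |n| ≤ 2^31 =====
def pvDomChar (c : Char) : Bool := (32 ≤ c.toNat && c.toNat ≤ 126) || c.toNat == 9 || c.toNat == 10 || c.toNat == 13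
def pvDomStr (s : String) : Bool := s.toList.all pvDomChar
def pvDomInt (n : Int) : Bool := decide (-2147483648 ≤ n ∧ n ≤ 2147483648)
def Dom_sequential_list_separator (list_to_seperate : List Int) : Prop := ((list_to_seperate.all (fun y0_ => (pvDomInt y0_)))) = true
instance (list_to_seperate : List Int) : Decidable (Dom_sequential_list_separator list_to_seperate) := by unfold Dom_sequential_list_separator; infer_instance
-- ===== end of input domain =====

-- B builds the groups back-to-front with a reverse fold instead of A's forward scan
-- with a prev_num sentinel and flush-on-break; return values agree on all nonempty lists.

-- ===== PORT A =====
-- the for-loop of A over (seperated_lists, sub_list, prev_num), as structural recursion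
def pvLoopA (xs : List Int) (sep : List (List Int)) (sub : List Int) (prev : Int) : List (List Int) :=
  match xs with
  | [] => sep ++ [sub]
  | x :: rest =>
    if prev + 1 ≠ x then            -- not sequential
      if sub = [] then pvLoopA rest sep (sub ++ [x]) x
      else pvLoopA rest (sep ++ [sub]) ([] ++ [x]) x   -- flush sub_list, then append x
    else pvLoopA rest sep (sub ++ [x]) x

def sequential_list_separator (list_to_seperate : List Int) : List (List Int) :=
  -- prev_num = min(sorted(list_to_seperate)) - 1
  match PySem.List.min? (PySem.List.sorted list_to_seperate (fun x => x) false) (fun x => x) with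
  | none => []   -- min([]) raises ValueError; excluded by Pre_
  | some m => pvLoopA list_to_seperate [] [] (m - 1)

-- ===== PORT B =====
-- loop body of B: 'if groups and groups[-1][-1] == v + 1: groups[-1].append(v) else: groups.append([v])'
def pvStepB (groups : List (List Int)) (v : Int) : List (List Int) :=
  match groups.getLast? with
  | some g =>
    match g.getLast? with
    | some w => if w = v + 1 then groups.dropLast ++ [g ++ [v]] else groups ++ [[v]]
    | none => groups ++ [[v]]
  | none => groups ++ [[v]]

def sequential_list_separator_alt (list_to_seperate : List Int) : List (List Int) :=
  -- 'for v in reversed(...)' is a fold over the reversed list; the return line undoes both reversals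
  ((list_to_seperate.reverse.foldl pvStepB []).reverse).map (fun g => g.reverse)

-- ===== PRECONDITION & SPEC =====
-- Pre_ excludes exactly the empty list, on which A's min([]) raises ValueError.
def Pre_sequential_list_separator (list_to_seperate : List Int) : Prop :=
  list_to_seperate ≠ []
instance (list_to_seperate : List Int) : Decidable (Pre_sequential_list_separator list_to_seperate) := by
  unfold Pre_sequential_list_separator; infer_instance

def pvWitness_sequential_list_separator : List Int := [1, 2, 5]

def Spec_sequential_list_separator (list_to_seperate : List Int) (out : List (List Int)) : Prop := out = sequential_list_separator_alt list_to_seperate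
instance (list_to_seperate : List Int) (out : List (List Int)) : Decidable (Spec_sequential_list_separator list_to_seperate out) := by unfold Spec_sequential_list_separator; infer_instance

-- ===== CLAIM (what is proved, stated in full; the proofs are below) =====
def Claim_equal_sequential_list_separator : Prop := ∀ (list_to_seperate : List Int), Dom_sequential_list_separator list_to_seperate → Pre_sequential_list_separator list_to_seperate → Spec_sequential_list_separator list_to_seperate (sequential_list_separator list_to_seperate)

-- ===== LEMMAS AND PROOFS =====

-- canonical grouping both programs compute: grow sub while sequential, cut otherwise
def pvMergeRuns (sub : List Int) (prev : Int) : List Int → List (List Int)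
  | [] => [sub]
  | x :: xs => if prev + 1 = x then pvMergeRuns (sub ++ [x]) x xs else sub :: pvMergeRuns [x] x xs

def pvPrependFirst (s : List Int) : List (List Int) → List (List Int)
  | [] => [s]
  | g :: gs => (s ++ g) :: gs

lemma pvMergeRuns_append (l : List Int) : ∀ (t : List Int) (prev : Int) (s : List Int),
    pvMergeRuns (s ++ t) prev l = pvPrependFirst s (pvMergeRuns t prev l) := by
  induction l with
  | nil => intro t prev s; simp [pvMergeRuns, pvPrependFirst]
  | cons x xs ih =>
    intro t prev s
    by_cases h : prev + 1 = x
    · simp only [pvMergeRuns, h, List.append_assoc, if_pos trivial]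
      exact ih (t ++ [x]) x s
    · simp [pvMergeRuns, h, pvPrependFirst]

lemma pvMergeRuns_shape (l : List Int) : ∀ (sub : List Int) (prev : Int),
    ∃ t gs, pvMergeRuns sub prev l = (sub ++ t) :: gs := by
  induction l with
  | nil => intro sub prev; exact ⟨[], [], by simp [pvMergeRuns]⟩
  | cons x xs ih =>
    intro sub prev
    by_cases h : prev + 1 = x
    · obtain ⟨t, gs, ht⟩ := ih (sub ++ [x]) x
      exact ⟨[x] ++ t, gs, by simp only [pvMergeRuns, h, ht, List.append_assoc, if_pos trivial]⟩
    · exact ⟨[], pvMergeRuns [x] x xs, by simp [pvMergeRuns, h]⟩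

lemma pvLoopA_eq (xs : List Int) : ∀ (sep : List (List Int)) (sub : List Int) (prev : Int),
    sub ≠ [] → pvLoopA xs sep sub prev = sep ++ pvMergeRuns sub prev xs := by
  induction xs with
  | nil => intro sep sub prev _; simp [pvLoopA, pvMergeRuns]
  | cons x rest ih =>
    intro sep sub prev hsub
    by_cases h : prev + 1 = x
    · simp only [pvLoopA, pvMergeRuns, h, ne_eq, not_true_eq_false, if_false, if_pos trivial]
      exact ih sep (sub ++ [x]) x (by simp)
    · simp only [pvLoopA, pvMergeRuns, h, ne_eq, not_false_eq_true, if_true, if_neg hsub,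
        List.nil_append]
      rw [ih (sep ++ [sub]) [x] x (by simp), List.append_assoc]
      rfl

-- the same step, seen from the front of the (un-reversed) group list
def pvStepF (v : Int) (groups : List (List Int)) : List (List Int) :=
  match groups with
  | (h :: t) :: gs => if h = v + 1 then (v :: h :: t) :: gs else [v] :: (h :: t) :: gs
  | _ => [v] :: groups

def pvRevAll (gs : List (List Int)) : List (List Int) := gs.reverse.map (fun g => g.reverse)

lemma pvRevAll_step (G : List (List Int)) (v : Int) :
    pvRevAll (pvStepB G v) = pvStepF v (pvRevAll G) := by
  rcases List.eq_nil_or_concat G with rfl | ⟨gs, g, rfl⟩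
  · simp [pvStepB, pvStepF, pvRevAll]
  · rcases List.eq_nil_or_concat g with rfl | ⟨h', w, rfl⟩
    · simp [pvStepB, pvStepF, pvRevAll]
    · by_cases hw : w = v + 1 <;>
        simp [pvStepB, pvStepF, pvRevAll, hw]

lemma alt_eq_foldr (l : List Int) :
    sequential_list_separator_alt l = l.foldr pvStepF [] := by
  show pvRevAll (l.reverse.foldl pvStepB []) = _
  rw [List.foldl_reverse]
  induction l with
  | nil => simp [pvRevAll]
  | cons x xs ih => simp only [List.foldr_cons, pvRevAll_step, ih]

lemma alt_eq_mergeRuns (xs : List Int) : ∀ (x : Int),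
    sequential_list_separator_alt (x :: xs) = pvMergeRuns [x] x xs := by
  induction xs with
  | nil => intro x; simp [alt_eq_foldr, pvStepF, pvMergeRuns]
  | cons y ys ih =>
    intro x
    have hstep : sequential_list_separator_alt (x :: y :: ys) =
        pvStepF x (sequential_list_separator_alt (y :: ys)) := by
      rw [alt_eq_foldr, alt_eq_foldr]; rfl
    obtain ⟨t, gs, ht⟩ := pvMergeRuns_shape ys [y] y
    rw [hstep, ih y, ht]
    by_cases h : x + 1 = y
    · have : pvMergeRuns [x] x (y :: ys) = pvMergeRuns ([x] ++ [y]) y ys := by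
        simp [pvMergeRuns, h]
      rw [this, pvMergeRuns_append, ht]
      simp [pvStepF, pvPrependFirst, h.symm]
    · have hne : ¬ ((y : Int) = x + 1) := fun hc => h hc.symm
      simp [pvStepF, pvMergeRuns, hne, h, ht]

-- ===== VERDICT (by name: the statement is the Claim_ definition above) =====
theorem sequential_list_separator_spec : Claim_equal_sequential_list_separator := by
  intro l _dom hpre
  unfold Spec_sequential_list_separator
  match l with
  | [] => exact absurd rfl hpre
  | x :: xs =>
    unfold sequential_list_separator
    cases hm : PySem.List.min? (PySem.List.sorted (x :: xs) (fun x => x) false) (fun x => x) with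
    | none =>
      rw [PySem.List.min?_eq_none_iff] at hm
      have := PySem.List.length_sorted (xs := x :: xs) (key := fun x => x) (rev := false)
      rw [hm] at this
      simp at this
    | some m =>
      have hfirst : pvLoopA (x :: xs) [] [] (m - 1) = pvLoopA xs [] [x] x := by
        by_cases h : m - 1 + 1 = x <;> simp [pvLoopA, h]
      show pvLoopA (x :: xs) [] [] (m - 1) = _
      rw [hfirst, pvLoopA_eq xs [] [x] x (by simp), alt_eq_mergeRuns xs x]
      simp
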